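-- pv_equiv track=rewrite | github.com/eren23/attocode | src/attoswarm/run_summary.py | _filter_runtime_files
-- ===== SOURCE A (Python) =====
-- def _filter_runtime_files(files: list[str], runtime_prefixes: list[str]) -> list[str]:
--     if not runtime_prefixes:
--         return files
--     filtered: list[str] = []
--     for path in files:
--         if any(path == prefix or path.startswith(f"{prefix}/") for prefix in runtime_prefixes):
--             continue
--         filtered.append(path)
--     return filtered
-- ===== SOURCE B (Python) =====
-- def _filter_runtime_files(files: list[str], runtime_prefixes: list[str]) -> list[str]:
--     if not runtime_prefixes:
--         return files
--     prefix_set = set(runtime_prefixes)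
--     out: list[str] = []
--     for path in files:
--         candidates = [path] + [path[:i] for i, ch in enumerate(path) if ch == '/']
--         if any(c in prefix_set for c in candidates):
--             continue
--         out.append(path)
--     return out
-- ===== Notes on version B (the rewrite author's own statement) =====
-- stated objective: faster
-- what changed: B builds a set of the prefixes once and tests each path by set-membership of its own slash-cut ancestor prefixes (path itself plus path[:i] at every '/'), instead of scanning the whole prefix list with any/startswith per path.
import Mathlib
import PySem

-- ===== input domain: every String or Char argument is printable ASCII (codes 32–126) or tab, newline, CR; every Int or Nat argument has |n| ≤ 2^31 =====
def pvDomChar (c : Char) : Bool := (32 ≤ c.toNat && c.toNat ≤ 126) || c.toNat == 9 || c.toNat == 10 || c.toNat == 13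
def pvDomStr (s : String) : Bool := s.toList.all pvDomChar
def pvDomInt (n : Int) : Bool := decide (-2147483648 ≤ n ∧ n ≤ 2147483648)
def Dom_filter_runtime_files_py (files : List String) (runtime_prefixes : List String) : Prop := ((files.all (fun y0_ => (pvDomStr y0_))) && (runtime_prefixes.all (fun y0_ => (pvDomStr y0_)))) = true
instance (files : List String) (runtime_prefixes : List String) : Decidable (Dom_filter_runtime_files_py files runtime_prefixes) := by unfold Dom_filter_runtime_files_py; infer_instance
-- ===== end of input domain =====

-- B replaces A's per-path scan of the prefix list (any/startswith) by one prefix set and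
-- membership tests on the path's own slash-cut ancestor prefixes; same return value.

-- ===== PORT A =====
-- f"{prefix}/" is ported as prefix's code points ++ ['/'] (exact concatenation on code points).
def filter_runtime_files_py (files : List String) (runtime_prefixes : List String) : List String :=
  if runtime_prefixes = [] then files
  else
    files.foldl (fun filtered path =>
      if runtime_prefixes.any (fun prefix_ =>
          path == prefix_ || PySem.Chars.startswith path.toList (prefix_.toList ++ ['/'])) then
        filtered
      else
        filtered ++ [path]) []

-- ===== PORT B =====
-- candidates = [path] + [path[:i] for i, ch in enumerate(path) if ch == '/']
def pvCandidates (path : String) : List String :=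
  path :: (PySem.List.enumerate path.toList).filterMap (fun ic =>
    if ic.2 = '/' then some (String.ofList (PySem.Chars.slice path.toList none (some ic.1))) else none)

def filter_runtime_files_py_alt (files : List String) (runtime_prefixes : List String) : List String :=
  if runtime_prefixes = [] then files
  else
    let prefix_set : PySem.Set String := PySem.Set.ofList runtime_prefixes
    files.foldl (fun out path =>
      if (pvCandidates path).any (fun c => PySem.Set.contains prefix_set c) then
        out
      else
        out ++ [path]) []

-- ===== PRECONDITION & SPEC =====
def Spec_filter_runtime_files_py (files : List String) (runtime_prefixes : List String) (out : List String) : Prop := out = filter_runtime_files_py_alt files runtime_prefixes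
instance (files : List String) (runtime_prefixes : List String) (out : List String) : Decidable (Spec_filter_runtime_files_py files runtime_prefixes out) := by unfold Spec_filter_runtime_files_py; infer_instance

-- ===== CLAIM (what is proved, stated in full; the proofs are below) =====
def Claim_equal_filter_runtime_files_py : Prop := ∀ (files : List String) (runtime_prefixes : List String), Dom_filter_runtime_files_py files runtime_prefixes → Spec_filter_runtime_files_py files runtime_prefixes (filter_runtime_files_py files runtime_prefixes)

-- ===== LEMMAS AND PROOFS =====

-- (q ++ ['/']) is a prefix of l exactly at a slash cut k = q.length
theorem key (l q : List Char) :
    (q ++ ['/']) <+: l ↔ ∃ k : Nat, k < l.length ∧ l[k]? = some '/' ∧ q = l.take k := by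
  constructor
  · rintro ⟨r, rfl⟩
    rw [List.append_assoc]
    refine ⟨q.length, by simp, ?_, by simp⟩
    rw [List.getElem?_append_right (le_refl _)]
    simp
  · rintro ⟨k, hk, hget, rfl⟩
    have h1 : l.take (k+1) = l.take k ++ ['/'] := by
      rw [List.take_add_one, hget]; rfl
    exact h1 ▸ List.take_prefix (k+1) l


-- A's test for one prefix holds iff that prefix is a slash-cut candidate of the path
theorem pv_mem_candidates_iff (path p : String) :
    (path == p || PySem.Chars.startswith path.toList (p.toList ++ ['/'])) = true
      ↔ p ∈ pvCandidates path := by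
  unfold pvCandidates
  rw [Bool.or_eq_true, PySem.Chars.startswith_iff, key]
  simp only [beq_iff_eq, List.mem_cons, List.mem_filterMap, PySem.List.mem_enumerate_iff]
  constructor
  · rintro (rfl | ⟨k, hk, hget, hq⟩)
    · left; rfl
    · right
      refine ⟨((0:Int) + (k:Int), '/'), ⟨k, hk, by rw [List.getElem?_eq_getElem hk] at hget; simp_all⟩, ?_⟩
    
      simp only [if_true, PySem.Chars.slice_eq_listSlice]
      rw [show ((0:Int) + (k:Int)) = ((k:Nat):Int) by omega, PySem.List.slice_to_natCast]
      rw [← hq]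
      simp
  · rintro (rfl | ⟨⟨i, c⟩, ⟨k, hk, hpair⟩, hf⟩)
    · left; rfl
    · right
      injection hpair with hi hc
      subst hi; subst hc
      by_cases hch : path.toList[k] = '/'
      · simp only [if_pos hch, PySem.Chars.slice_eq_listSlice] at hf
        rw [show ((0:Int) + (k:Int)) = ((k:Nat):Int) by omega, PySem.List.slice_to_natCast] at hf
        refine ⟨k, hk, by rw [List.getElem?_eq_getElem hk, hch], ?_⟩
        obtain rfl := Option.some.inj hf
        simp
      · simp [hch] at hf


-- the two per-path conditions agree
theorem pv_cond_eq (path : String) (rp : List String) :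
    rp.any (fun prefix_ =>
        path == prefix_ || PySem.Chars.startswith path.toList (prefix_.toList ++ ['/']))
      = (pvCandidates path).any (fun c => PySem.Set.contains (PySem.Set.ofList rp) c) := by
  rw [Bool.eq_iff_iff]
  simp only [List.any_eq_true, pv_mem_candidates_iff, PySem.Set.contains_iff, PySem.Set.mem_ofList]
  exact ⟨fun ⟨p, hp, hc⟩ => ⟨p, hc, hp⟩, fun ⟨c, hc, hp⟩ => ⟨c, hp, hc⟩⟩

-- ===== VERDICT (by name: the statement is the Claim_ definition above) =====
theorem filter_runtime_files_py_spec : Claim_equal_filter_runtime_files_py := by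
  intro files rp _
  unfold Spec_filter_runtime_files_py filter_runtime_files_py filter_runtime_files_py_alt
  by_cases h : rp = []
  · simp [h]
  · simp only [h, if_false]
    refine PySem.List.foldl_congr_mem _ _ _ _ ?_
    intro acc path _
    rw [pv_cond_eq]
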